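-- pv_equiv track=rewrite | github.com/djmoore711/brandfetch-mcp | src/brandfetch_mcp/server.py | format_colors_response
-- ===== SOURCE A (Python) =====
-- def format_colors_response(colors: list) -> str:
--     """Format color palette for readability."""
--     if not colors:
--         return "No colors found for this brand."
--
--     lines = [f"**Brand Color Palette:** {len(colors)} colors\n"]
--
--     # Group by type for better organization
--     by_type = {}
--     for color in colors:
--         color_type = color.get('type', 'unknown')
--         if color_type not in by_type:
--             by_type[color_type] = []
--         by_type[color_type].append(color)
--
--     # Display in organized groups
--     type_order = ['brand', 'accent', 'primary', 'secondary', 'dark', 'light', 'unknown']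
--
--     for color_type in type_order:
--         if color_type in by_type:
--             lines.append(f"**{color_type.title()} Colors:**")
--             for color in by_type[color_type]:
--                 hex_code = color.get('hex', '#000000')
--                 brightness = color.get('brightness', 'N/A')
--                 lines.append(f"  • {hex_code} (brightness: {brightness})")
--             lines.append("")
--
--     return "\n".join(lines).strip()
-- ===== SOURCE B (Python) =====
-- def format_colors_response(colors: list) -> str:
--     """Format color palette for readability (no grouping dict: one scan of colors per type)."""
--     if not colors:
--         return "No colors found for this brand."
--
--     def block(color_type):
--         group = [c for c in colors if c.get('type', 'unknown') == color_type]
--         if not group: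
--             return []
--         return ([f"**{color_type.title()} Colors:**"]
--                 + [f"  • {c.get('hex', '#000000')} (brightness: {c.get('brightness', 'N/A')})"
--                    for c in group]
--                 + [""])
--
--     type_order = ['brand', 'accent', 'primary', 'secondary', 'dark', 'light', 'unknown']
--     lines = [f"**Brand Color Palette:** {len(colors)} colors\n"] + [
--         line for t in type_order for line in block(t)]
--     return "\n".join(lines).strip()
-- ===== Notes on version B (the rewrite author's own statement) =====
-- stated objective: simpler
-- what changed: Drops the by_type grouping dict and its build loop: B scans the colors list once per entry of the fixed type_order list with a filtering comprehension and concatenates per-type blocks directly.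
import Mathlib
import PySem

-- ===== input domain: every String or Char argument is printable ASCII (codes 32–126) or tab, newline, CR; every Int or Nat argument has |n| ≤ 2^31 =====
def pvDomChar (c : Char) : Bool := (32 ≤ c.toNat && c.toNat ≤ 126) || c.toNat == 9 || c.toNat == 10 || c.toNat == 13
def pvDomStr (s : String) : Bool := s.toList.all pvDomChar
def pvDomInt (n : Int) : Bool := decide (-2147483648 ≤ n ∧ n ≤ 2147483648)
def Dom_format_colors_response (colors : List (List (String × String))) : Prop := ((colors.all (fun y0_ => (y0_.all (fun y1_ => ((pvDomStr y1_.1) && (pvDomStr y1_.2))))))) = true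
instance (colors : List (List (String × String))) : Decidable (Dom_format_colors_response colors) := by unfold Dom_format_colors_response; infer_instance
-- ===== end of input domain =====

-- B drops A's grouping dict and instead filters the colors list once per fixed type; objective: simpler.

-- shared dict/string primitives used by BOTH Pythons' code
-- dict.get(k, default) on an association list (first match = Python dict lookup)
def dget (c : List (String × String)) (k d : String) : String :=
  match c.find? (fun p => p.1 == k) with
  | some p => p.2
  | none => d

-- str.title(): exact on the ASCII domain (cased char = ASCII letter there)
def titleAux : Bool → List Char → List Char
  | _, [] => []
  | prevCased, c :: cs => (if prevCased then c.toLower else c.toUpper) :: titleAux c.isAlpha cs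

def pyTitle (s : String) : String := String.ofList (titleAux false s.toList)

-- ===== PORT A =====
def format_colors_response (colors : List (List (String × String))) : String :=
  if colors.isEmpty then "No colors found for this brand."
  else
    let lines : List String :=
      ["**Brand Color Palette:** " ++ PySem.Int.toStr (colors.length : Int) ++ " colors\n"]
    -- by_type[t] = [] if absent; by_type[t].append(color)  =  modify with default []
    let byType : PySem.Dict String (List (List (String × String))) :=
      colors.foldl (fun d color => d.modify (dget color "type" "unknown") [] (· ++ [color]))
        PySem.Dict.empty
    let typeOrder : List String :=
      ["brand", "accent", "primary", "secondary", "dark", "light", "unknown"]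
    let lines := typeOrder.foldl (fun ls colorType =>
      if byType.contains colorType then
        ((byType.getD colorType []).foldl (fun ls2 color =>
            ls2 ++ ["  • " ++ dget color "hex" "#000000" ++ " (brightness: " ++
                    dget color "brightness" "N/A" ++ ")"])
          (ls ++ ["**" ++ pyTitle colorType ++ " Colors:**"])) ++ [""]
      else ls) lines
    PySem.Str.strip (PySem.Str.join "\n" lines)

-- ===== PORT B =====
def pvBlock (colors : List (List (String × String))) (colorType : String) : List String :=
  let group := colors.filter (fun c => dget c "type" "unknown" == colorType)
  if group.isEmpty then []
  else
    ("**" ++ pyTitle colorType ++ " Colors:**") ::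
      (group.map (fun c => "  • " ++ dget c "hex" "#000000" ++ " (brightness: " ++
                           dget c "brightness" "N/A" ++ ")")
       ++ [""])

def format_colors_response_alt (colors : List (List (String × String))) : String :=
  if colors.isEmpty then "No colors found for this brand."
  else
    PySem.Str.strip (PySem.Str.join "\n"
      (("**Brand Color Palette:** " ++ PySem.Int.toStr (colors.length : Int) ++ " colors\n") ::
        (["brand", "accent", "primary", "secondary", "dark", "light", "unknown"].flatMap
          (pvBlock colors))))

-- ===== PRECONDITION & SPEC =====
def Spec_format_colors_response (colors : List (List (String × String))) (out : String) : Prop := out = format_colors_response_alt colors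
instance (colors : List (List (String × String))) (out : String) : Decidable (Spec_format_colors_response colors out) := by unfold Spec_format_colors_response; infer_instance

-- ===== CLAIM (what is proved, stated in full; the proofs are below) =====
def Claim_equal_format_colors_response : Prop := ∀ (colors : List (List (String × String))), Dom_format_colors_response colors → Spec_format_colors_response colors (format_colors_response colors)

-- ===== LEMMAS AND PROOFS =====

-- the grouping dict's entry for a key is exactly the filter of the input list
theorem byType_getD (colors : List (List (String × String))) (ct : String) :
    (colors.foldl (fun d color => d.modify (dget color "type" "unknown") [] (· ++ [color]))
        (PySem.Dict.empty : PySem.Dict String (List (List (String × String))))).getD ct []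
      = colors.filter (fun c => dget c "type" "unknown" == ct) := by
  rw [← List.foldl_map (f := fun c => (dget c "type" "unknown", c))
        (g := fun (d : PySem.Dict String (List (List (String × String))))
             (p : String × List (String × String)) => d.modify p.1 [] (· ++ [p.2]))]
  rw [PySem.Dict.getD_foldl_modify_append]
  simp [List.filter_map, Function.comp_def, List.map_map]

-- contains through the grouping fold, generalized over the starting dict
theorem contains_foldl_modify_aux (l : List (List (String × String)))
    (d : PySem.Dict String (List (List (String × String)))) (k : String) :
    (l.foldl (fun d c => d.modify (dget c "type" "unknown") [] (· ++ [c])) d).contains k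
      = (d.contains k || l.any (fun c => dget c "type" "unknown" == k)) := by
  induction l generalizing d with
  | nil => rw [List.foldl_nil, List.any_nil, Bool.or_false]
  | cons c cs ih =>
      simp only [List.foldl_cons, ih, PySem.Dict.contains_modify, List.any_cons]
      have hcomm : (k == dget c "type" "unknown") = (dget c "type" "unknown" == k) := by
        rw [Bool.eq_iff_iff, beq_iff_eq, beq_iff_eq]; exact eq_comm
      rw [hcomm]
      cases d.contains k <;> cases (dget c "type" "unknown" == k) <;> simp

-- key membership in the grouping dict ↔ the filtered group is non-empty
theorem byType_contains (colors : List (List (String × String))) (ct : String) :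
    (colors.foldl (fun d color => d.modify (dget color "type" "unknown") [] (· ++ [color]))
        (PySem.Dict.empty : PySem.Dict String (List (List (String × String))))).contains ct
      = !(colors.filter (fun c => dget c "type" "unknown" == ct)).isEmpty := by
  rw [contains_foldl_modify_aux, PySem.Dict.contains_empty, Bool.false_or, Bool.eq_iff_iff]
  simp only [List.any_eq_true, Bool.not_eq_eq_eq_not, Bool.not_true, List.isEmpty_eq_false_iff,
    ne_eq]
  constructor
  · rintro ⟨c, hc, hp⟩ hnil
    have hm : c ∈ colors.filter (fun c => dget c "type" "unknown" == ct) :=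
      List.mem_filter.mpr ⟨hc, hp⟩
    simp [hnil] at hm
  · intro h
    obtain ⟨c, hcmem⟩ := List.exists_mem_of_ne_nil _ h
    obtain ⟨hc, hp⟩ := List.mem_filter.mp hcmem
    exact ⟨c, hc, hp⟩

-- A's per-type loop body equals "append B's block", pointwise
theorem body_eq (colors : List (List (String × String))) (ls : List String) (ct : String) :
    (if (colors.foldl (fun d color => d.modify (dget color "type" "unknown") [] (· ++ [color]))
            (PySem.Dict.empty : PySem.Dict String (List (List (String × String))))).contains ct then
        (((colors.foldl (fun d color => d.modify (dget color "type" "unknown") [] (· ++ [color]))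
            (PySem.Dict.empty : PySem.Dict String (List (List (String × String))))).getD ct []).foldl
          (fun ls2 color =>
            ls2 ++ ["  • " ++ dget color "hex" "#000000" ++ " (brightness: " ++
                    dget color "brightness" "N/A" ++ ")"])
          (ls ++ ["**" ++ pyTitle ct ++ " Colors:**"])) ++ [""]
      else ls) = ls ++ pvBlock colors ct := by
  rw [PySem.List.foldl_append_singleton_eq_map, byType_getD, byType_contains]
  unfold pvBlock
  cases hg : (colors.filter (fun c => dget c "type" "unknown" == ct)).isEmpty <;>
    simp [hg, List.append_assoc]

-- the whole per-type fold is B's flatMap of blocks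
theorem fold_blocks (colors : List (List (String × String))) (tos : List String)
    (ls : List String) :
    tos.foldl (fun (ls : List String) (colorType : String) =>
      if (colors.foldl (fun d color => d.modify (dget color "type" "unknown") [] (· ++ [color]))
            (PySem.Dict.empty : PySem.Dict String (List (List (String × String))))).contains colorType then
        (((colors.foldl (fun d color => d.modify (dget color "type" "unknown") [] (· ++ [color]))
            (PySem.Dict.empty : PySem.Dict String (List (List (String × String))))).getD colorType []).foldl
          (fun ls2 color =>
            ls2 ++ ["  • " ++ dget color "hex" "#000000" ++ " (brightness: " ++
                    dget color "brightness" "N/A" ++ ")"])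
          (ls ++ ["**" ++ pyTitle colorType ++ " Colors:**"])) ++ [""]
      else ls) ls
    = ls ++ tos.flatMap (pvBlock colors) := by
  induction tos generalizing ls with
  | nil => simp
  | cons t ts ih =>
      rw [List.foldl_cons, body_eq, ih, List.flatMap_cons, List.append_assoc]

theorem main_eq (colors : List (List (String × String))) :
    format_colors_response colors = format_colors_response_alt colors := by
  unfold format_colors_response format_colors_response_alt
  cases hE : colors.isEmpty
  · simp only [Bool.false_eq_true, if_false]
    rw [fold_blocks]
    simp
  · simp

-- ===== VERDICT (by name: the statement is the Claim_ definition above) =====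
theorem format_colors_response_spec : Claim_equal_format_colors_response := by
  intro colors _
  unfold Spec_format_colors_response
  exact main_eq colors
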